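-- pv_equiv track=rewrite | github.com/Vertick/PlazaRobotica-Loterias | src/selection/set8_scoring.py | decade_bins
-- ===== SOURCE A (Python) =====
-- from typing import Dict, Iterable, List, Sequence, Tuple
--
-- DECADE_KEYS = ("d1_09", "d10_19", "d20_29", "d30_39", "d40_49", "d50_54")
--
-- def decade_bins(numbers: Sequence[int]) -> Dict[str, int]:
--     bins = {k: 0 for k in DECADE_KEYS}
--     for n in numbers:
--         if 1 <= n <= 9:
--             bins["d1_09"] += 1
--         elif 10 <= n <= 19:
--             bins["d10_19"] += 1
--         elif 20 <= n <= 29: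
--             bins["d20_29"] += 1
--         elif 30 <= n <= 39:
--             bins["d30_39"] += 1
--         elif 40 <= n <= 49:
--             bins["d40_49"] += 1
--         elif 50 <= n <= 54:
--             bins["d50_54"] += 1
--     return bins
-- ===== SOURCE B (Python) =====
-- DECADE_KEYS = ("d1_09", "d10_19", "d20_29", "d30_39", "d40_49", "d50_54")
-- RANGES = ((1, 9), (10, 19), (20, 29), (30, 39), (40, 49), (50, 54))
--
-- def decade_bins(numbers):
--     # One counting pass per bucket instead of per-element dispatch.
--     return {k: sum(1 for n in numbers if lo <= n <= hi)
--             for k, (lo, hi) in zip(DECADE_KEYS, RANGES)}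
-- ===== Notes on version B (the rewrite author's own statement) =====
-- stated objective: alternative
-- what changed: Instead of a single pass dispatching each element through a six-branch if/elif into a mutable counter dict, B builds the dict by comprehension with one independent range-count pass per bucket (sum over a generator), with no mutation and no branching cascade.
import Mathlib
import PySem

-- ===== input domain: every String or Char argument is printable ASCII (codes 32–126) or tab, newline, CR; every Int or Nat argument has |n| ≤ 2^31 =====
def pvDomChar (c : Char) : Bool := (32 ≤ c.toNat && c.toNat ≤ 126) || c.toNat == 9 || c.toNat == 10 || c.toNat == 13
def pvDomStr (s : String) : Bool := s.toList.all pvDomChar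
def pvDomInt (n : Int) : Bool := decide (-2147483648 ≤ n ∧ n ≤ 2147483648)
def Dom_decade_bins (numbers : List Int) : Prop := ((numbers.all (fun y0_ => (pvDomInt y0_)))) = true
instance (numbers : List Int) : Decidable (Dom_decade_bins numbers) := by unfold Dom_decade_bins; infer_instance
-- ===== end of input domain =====

-- B builds the result dict by comprehension with one independent range-count pass per bucket, instead of A's single pass dispatching each element through a six-branch if/elif into a mutable counter dict (objective: alternative).


def DECADE_KEYS : List String := ["d1_09", "d10_19", "d20_29", "d30_39", "d40_49", "d50_54"]

-- ===== PORT A =====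
def decade_bins (numbers : List Int) : List (String × Int) :=
  let bins : PySem.Dict String Int :=
    DECADE_KEYS.foldl (fun d k => d.insert k 0) PySem.Dict.empty
  (numbers.foldl (fun bins n =>
    if 1 ≤ n ∧ n ≤ 9 then bins.modify "d1_09" 0 (· + 1)
    else if 10 ≤ n ∧ n ≤ 19 then bins.modify "d10_19" 0 (· + 1)
    else if 20 ≤ n ∧ n ≤ 29 then bins.modify "d20_29" 0 (· + 1)
    else if 30 ≤ n ∧ n ≤ 39 then bins.modify "d30_39" 0 (· + 1)
    else if 40 ≤ n ∧ n ≤ 49 then bins.modify "d40_49" 0 (· + 1)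
    else if 50 ≤ n ∧ n ≤ 54 then bins.modify "d50_54" 0 (· + 1)
    else bins) bins).items

-- ===== PORT B =====
def RANGES : List (Int × Int) := [(1, 9), (10, 19), (20, 29), (30, 39), (40, 49), (50, 54)]

-- sum(1 for n in numbers if lo <= n <= hi)
def cntRange (lo hi : Int) (numbers : List Int) : Int :=
  numbers.foldl (fun acc n => if lo ≤ n ∧ n ≤ hi then acc + 1 else acc) 0

-- the dict comprehension runs over zip(DECADE_KEYS, RANGES); its keys are distinct,
-- so the resulting dict's items are exactly this list in zip order
def decade_bins_alt (numbers : List Int) : List (String × Int) :=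
  (DECADE_KEYS.zip RANGES).map (fun p => (p.1, cntRange p.2.1 p.2.2 numbers))

-- ===== PRECONDITION & SPEC =====
def Spec_decade_bins (numbers : List Int) (out : List (String × Int)) : Prop := out = decade_bins_alt numbers
instance (numbers : List Int) (out : List (String × Int)) : Decidable (Spec_decade_bins numbers out) := by unfold Spec_decade_bins; infer_instance

-- ===== CLAIM (what is proved, stated in full; the proofs are below) =====
def Claim_equal_decade_bins : Prop := ∀ (numbers : List Int), Dom_decade_bins numbers → Spec_decade_bins numbers (decade_bins numbers)

-- ===== LEMMAS AND PROOFS =====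

theorem cntRange_eq_sum (lo hi : Int) (l : List Int) :
    cntRange lo hi l = (l.map (fun n => if lo ≤ n ∧ n ≤ hi then (1 : Int) else 0)).sum := by
  unfold cntRange
  have h : (fun (acc : Int) (n : Int) => if lo ≤ n ∧ n ≤ hi then acc + 1 else acc)
      = (fun (acc : Int) (n : Int) => acc + if lo ≤ n ∧ n ≤ hi then (1 : Int) else 0) := by
    funext acc n; split_ifs <;> simp
  rw [h, PySem.List.foldl_add]; simp

theorem cntRange_cons (lo hi n : Int) (t : List Int) :
    cntRange lo hi (n :: t) = (if lo ≤ n ∧ n ≤ hi then (1 : Int) else 0) + cntRange lo hi t := by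
  simp [cntRange_eq_sum]

theorem A_loop (l : List Int) : ∀ a b c d e f : Int,
    (l.foldl (fun bins n =>
      if 1 ≤ n ∧ n ≤ 9 then bins.modify "d1_09" 0 (· + 1)
      else if 10 ≤ n ∧ n ≤ 19 then bins.modify "d10_19" 0 (· + 1)
      else if 20 ≤ n ∧ n ≤ 29 then bins.modify "d20_29" 0 (· + 1)
      else if 30 ≤ n ∧ n ≤ 39 then bins.modify "d30_39" 0 (· + 1)
      else if 40 ≤ n ∧ n ≤ 49 then bins.modify "d40_49" 0 (· + 1)
      else if 50 ≤ n ∧ n ≤ 54 then bins.modify "d50_54" 0 (· + 1)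
      else bins)
      (PySem.Dict.mk [("d1_09", a), ("d10_19", b), ("d20_29", c),
                      ("d30_39", d), ("d40_49", e), ("d50_54", f)])).items
    = [("d1_09", a + cntRange 1 9 l), ("d10_19", b + cntRange 10 19 l),
       ("d20_29", c + cntRange 20 29 l), ("d30_39", d + cntRange 30 39 l),
       ("d40_49", e + cntRange 40 49 l), ("d50_54", f + cntRange 50 54 l)] := by
  induction l with
  | nil => intro a b c d e f; simp [cntRange]
  | cons n t ih =>
    intro a b c d e f
    simp only [List.foldl_cons, cntRange_cons]
    by_cases h1 : 1 ≤ n ∧ n ≤ 9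
    · rw [if_pos h1, if_pos h1]
      show (t.foldl _ (PySem.Dict.mk [("d1_09", a + 1), ("d10_19", b), ("d20_29", c),
          ("d30_39", d), ("d40_49", e), ("d50_54", f)])).items = _
      rw [ih]
      simp only [List.cons.injEq, Prod.mk.injEq, and_true, true_and]
      refine ⟨by omega, by rw [if_neg (by omega)]; omega, by rw [if_neg (by omega)]; omega,
        by rw [if_neg (by omega)]; omega, by rw [if_neg (by omega)]; omega,
        by rw [if_neg (by omega)]; omega⟩
    · rw [if_neg h1, if_neg h1]
      by_cases h2 : 10 ≤ n ∧ n ≤ 19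
      · rw [if_pos h2, if_pos h2]
        show (t.foldl _ (PySem.Dict.mk [("d1_09", a), ("d10_19", b + 1), ("d20_29", c),
            ("d30_39", d), ("d40_49", e), ("d50_54", f)])).items = _
        rw [ih]
        simp only [List.cons.injEq, Prod.mk.injEq, and_true, true_and]
        refine ⟨by omega, by omega, by rw [if_neg (by omega)]; omega,
          by rw [if_neg (by omega)]; omega, by rw [if_neg (by omega)]; omega,
          by rw [if_neg (by omega)]; omega⟩
      · rw [if_neg h2, if_neg h2]
        by_cases h3 : 20 ≤ n ∧ n ≤ 29
        · rw [if_pos h3, if_pos h3]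
          show (t.foldl _ (PySem.Dict.mk [("d1_09", a), ("d10_19", b), ("d20_29", c + 1),
              ("d30_39", d), ("d40_49", e), ("d50_54", f)])).items = _
          rw [ih]
          simp only [List.cons.injEq, Prod.mk.injEq, and_true, true_and]
          refine ⟨by omega, by omega, by omega, by rw [if_neg (by omega)]; omega,
            by rw [if_neg (by omega)]; omega, by rw [if_neg (by omega)]; omega⟩
        · rw [if_neg h3, if_neg h3]
          by_cases h4 : 30 ≤ n ∧ n ≤ 39
          · rw [if_pos h4, if_pos h4]
            show (t.foldl _ (PySem.Dict.mk [("d1_09", a), ("d10_19", b), ("d20_29", c),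
                ("d30_39", d + 1), ("d40_49", e), ("d50_54", f)])).items = _
            rw [ih]
            simp only [List.cons.injEq, Prod.mk.injEq, and_true, true_and]
            refine ⟨by omega, by omega, by omega, by omega,
              by rw [if_neg (by omega)]; omega, by rw [if_neg (by omega)]; omega⟩
          · rw [if_neg h4, if_neg h4]
            by_cases h5 : 40 ≤ n ∧ n ≤ 49
            · rw [if_pos h5, if_pos h5]
              show (t.foldl _ (PySem.Dict.mk [("d1_09", a), ("d10_19", b), ("d20_29", c),
                  ("d30_39", d), ("d40_49", e + 1), ("d50_54", f)])).items = _
              rw [ih]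
              simp only [List.cons.injEq, Prod.mk.injEq, and_true, true_and]
              refine ⟨by omega, by omega, by omega, by omega, by omega,
                by rw [if_neg (by omega)]; omega⟩
            · rw [if_neg h5, if_neg h5]
              by_cases h6 : 50 ≤ n ∧ n ≤ 54
              · rw [if_pos h6, if_pos h6]
                show (t.foldl _ (PySem.Dict.mk [("d1_09", a), ("d10_19", b), ("d20_29", c),
                    ("d30_39", d), ("d40_49", e), ("d50_54", f + 1)])).items = _
                rw [ih]
                simp only [List.cons.injEq, Prod.mk.injEq, and_true, true_and]
                omega
              · rw [if_neg h6, if_neg h6, ih]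
                simp only [List.cons.injEq, Prod.mk.injEq, and_true, true_and]
                refine ⟨by omega, by omega, by omega, by omega, by omega, by omega⟩

-- ===== VERDICT (by name: the statement is the Claim_ definition above) =====
theorem decade_bins_spec : Claim_equal_decade_bins := by
  intro numbers _
  unfold Spec_decade_bins decade_bins decade_bins_alt
  show (numbers.foldl _ (PySem.Dict.mk [("d1_09", (0:Int)), ("d10_19", 0), ("d20_29", 0),
      ("d30_39", 0), ("d40_49", 0), ("d50_54", 0)])).items = _
  rw [A_loop]
  simp [DECADE_KEYS, RANGES, List.zip]
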